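-- pv_equiv track=rewrite | github.com/42plat0/flask-apyvartos-skaiciuokle | static/modules/stringparse/stringparse.py | delete_string_end
-- ===== SOURCE A (Python) =====
-- def delete_string_end(string, delete_string):
--     target_string = [*string][::-1]
--     keys = [*delete_string][::-1]
--
--     for i in range(len(keys) + 1):
--         try:
--             key_target = target_string[0]
--             key = keys[0]
--         except (IndexError):
--             target_string.pop(0) # Pop backslash
--             break
--
--         if key == key_target:
--             target_string.pop(0)
--             keys.pop(0)
--
--     return "".join((target_string[::-1])) # Unreverse string
-- ===== SOURCE B (Python) =====
-- def delete_string_end(string, delete_string):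
--     # Single backward pass: length of the common suffix, then one slice.
--     k = 0
--     for a, b in zip(reversed(string), reversed(delete_string)):
--         if a != b:
--             break
--         k += 1
--     if k == len(delete_string):
--         return string[:len(string) - len(delete_string) - 1]
--     return string[:len(string) - k]
-- ===== Notes on version B (the rewrite author's own statement) =====
-- stated objective: faster
-- what changed: Replaces the reversed-list loop with repeated pop(0) (each O(n)) by a single backward scan computing the common-suffix length followed by one slice.
-- crash fix: A raises IndexError (pop from empty list) exactly when delete_string ends with string (including string == '' and string == delete_string); B returns the natural value there (the slice, e.g. '' when string is a proper suffix of delete_string). — e.g. on delete_string_end("ab", "cab"): A raises IndexError, B returns ""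
import Mathlib
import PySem

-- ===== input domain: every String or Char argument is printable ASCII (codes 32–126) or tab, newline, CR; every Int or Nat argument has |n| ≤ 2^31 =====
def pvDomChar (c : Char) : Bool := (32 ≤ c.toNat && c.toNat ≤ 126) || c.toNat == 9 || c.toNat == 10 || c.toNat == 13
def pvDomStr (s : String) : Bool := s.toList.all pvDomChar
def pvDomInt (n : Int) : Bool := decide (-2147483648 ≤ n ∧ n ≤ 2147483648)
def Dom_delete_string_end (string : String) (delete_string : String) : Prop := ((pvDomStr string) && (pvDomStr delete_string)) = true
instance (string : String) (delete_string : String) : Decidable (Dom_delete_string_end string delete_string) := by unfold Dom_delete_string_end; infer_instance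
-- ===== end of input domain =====

-- B replaces A's reversed-list loop with repeated pop(0) by one backward common-suffix
-- scan plus a single slice (measured asymptotically faster); equal wherever A returns.


-- ===== PORT A =====
-- one iteration of A's for-loop body; state = (target_string, keys, broken?)
-- (on the excluded raising inputs — target empty in the except branch — `tail` stands in;
--  Pre_ excludes exactly those inputs)
def pvStepA (st : List Char × List Char × Bool) : List Char × List Char × Bool :=
  match st with
  | (t, ks, br) =>
    if br then (t, ks, br)
    else
      match t, ks with
      | c :: t', k :: ks' => if k = c then (t', ks', false) else (t, ks, false)
      | _, _ => (t.tail, ks, true)   -- except IndexError: target_string.pop(0); break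

def delete_string_end (string : String) (delete_string : String) : String :=
  let target0 := string.toList.reverse
  let keys0 := delete_string.toList.reverse
  let res := (List.range (keys0.length + 1)).foldl (fun st _ => pvStepA st) (target0, keys0, false)
  String.ofList res.1.reverse

-- ===== PORT B =====
-- B's zip(reversed, reversed) loop counting matching chars
def pvSufLen : List Char → List Char → Nat
  | a :: as, b :: bs => if a = b then pvSufLen as bs + 1 else 0
  | _, _ => 0

def delete_string_end_alt (string : String) (delete_string : String) : String :=
  let s := string.toList
  let d := delete_string.toList
  let k := pvSufLen s.reverse d.reverse
  if k = d.length then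
    String.ofList (PySem.List.slice s none (some ((s.length : Int) - (d.length : Int) - 1)))
  else
    String.ofList (PySem.List.slice s none (some ((s.length : Int) - (k : Int))))

-- ===== PRECONDITION & SPEC =====
-- Pre_ excludes exactly the inputs on which A raises IndexError (pop(0) from an empty
-- list): those where delete_string ends with string (incl. string = "").
def Pre_delete_string_end (string : String) (delete_string : String) : Prop :=
  ¬ (string.toList.reverse.isPrefixOf delete_string.toList.reverse = true)
instance (string : String) (delete_string : String) : Decidable (Pre_delete_string_end string delete_string) := by unfold Pre_delete_string_end; infer_instance
def pvWitness_delete_string_end : String × String := ("hello.txt", ".txt")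

-- A raises IndexError exactly when delete_string ends with string; B returns the slice there.
def Raises_delete_string_end (string : String) (delete_string : String) : Prop :=
  string.toList.reverse.isPrefixOf delete_string.toList.reverse = true
instance (string : String) (delete_string : String) : Decidable (Raises_delete_string_end string delete_string) := by unfold Raises_delete_string_end; infer_instance
def pvRaiseWitness_delete_string_end : String × String := ("ab", "cab")
def pvRaiseWitnessOut_delete_string_end : String := ""

def Spec_delete_string_end (string : String) (delete_string : String) (out : String) : Prop := out = delete_string_end_alt string delete_string
instance (string : String) (delete_string : String) (out : String) : Decidable (Spec_delete_string_end string delete_string out) := by unfold Spec_delete_string_end; infer_instance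

-- ===== CLAIM (what is proved, stated in full; the proofs are below) =====
def Claim_equal_delete_string_end : Prop := ∀ (string : String) (delete_string : String), Dom_delete_string_end string delete_string → Pre_delete_string_end string delete_string → Spec_delete_string_end string delete_string (delete_string_end string delete_string)
-- proved at the bottom as theorem delete_string_end_raises
def Claim_raises_delete_string_end : Prop := (∀ (string : String) (delete_string : String), Dom_delete_string_end string delete_string → Raises_delete_string_end string delete_string → ¬ Pre_delete_string_end string delete_string) ∧ (Dom_delete_string_end (pvRaiseWitness_delete_string_end.1) (pvRaiseWitness_delete_string_end.2) ∧ Raises_delete_string_end (pvRaiseWitness_delete_string_end.1) (pvRaiseWitness_delete_string_end.2) ∧ delete_string_end_alt (pvRaiseWitness_delete_string_end.1) (pvRaiseWitness_delete_string_end.2) = pvRaiseWitnessOut_delete_string_end)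

-- ===== LEMMAS AND PROOFS =====

lemma pvLoop_eq_iterate (n : ℕ) (st : List Char × List Char × Bool) :
    (List.range n).foldl (fun st _ => pvStepA st) st = pvStepA^[n] st := by
  induction n generalizing st with
  | zero => simp
  | succ n ih =>
      rw [List.range_succ, List.foldl_append, ih, Function.iterate_succ_apply']
      simp [List.foldl]

lemma pvStepA_broken (t ks : List Char) : pvStepA (t, ks, true) = (t, ks, true) := rfl

lemma pvStepA_match (c : Char) (t ks : List Char) :
    pvStepA (c :: t, c :: ks, false) = (t, ks, false) := by
  simp [pvStepA]

lemma pvStepA_mismatch (c k : Char) (t ks : List Char) (h : k ≠ c) :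
    pvStepA (c :: t, k :: ks, false) = (c :: t, k :: ks, false) := by
  simp [pvStepA, h]

lemma pvStepA_keysEmpty (t : List Char) : pvStepA (t, [], false) = (t.tail, [], true) := by
  cases t <;> simp [pvStepA]

lemma pvIterate_broken (n : ℕ) (t ks : List Char) :
    pvStepA^[n] (t, ks, true) = (t, ks, true) := by
  induction n with
  | zero => rfl
  | succ n ih => rw [Function.iterate_succ_apply, pvStepA_broken, ih]

lemma pvIterate_mismatch (n : ℕ) (c k : Char) (t ks : List Char) (h : k ≠ c) :
    pvStepA^[n] (c :: t, k :: ks, false) = (c :: t, k :: ks, false) := by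
  induction n with
  | zero => rfl
  | succ n ih => rw [Function.iterate_succ_apply, pvStepA_mismatch c k t ks h, ih]

lemma pvSufLen_le_right (t ks : List Char) : pvSufLen t ks ≤ ks.length := by
  induction t generalizing ks with
  | nil => cases ks <;> simp [pvSufLen]
  | cons a as ih =>
      cases ks with
      | nil => simp [pvSufLen]
      | cons b bs =>
          simp only [pvSufLen, List.length_cons]
          split_ifs
          · exact Nat.succ_le_succ (ih bs)
          · omega

lemma pvSufLen_le_left (t ks : List Char) : pvSufLen t ks ≤ t.length := by
  induction t generalizing ks with
  | nil => cases ks <;> simp [pvSufLen]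
  | cons a as ih =>
      cases ks with
      | nil => simp [pvSufLen]
      | cons b bs =>
          simp only [pvSufLen, List.length_cons]
          split_ifs
          · exact Nat.succ_le_succ (ih bs)
          · omega

-- main loop characterization: after ks.length+1 (or more) steps, with t not a prefix of ks,
-- the target list is t with pvSufLen t ks chars dropped (plus one more if ks was fully matched)
lemma pvLoop_main (n : ℕ) (t ks : List Char)
    (hpre : ¬ (t.isPrefixOf ks = true)) (hn : ks.length < n) :
    (pvStepA^[n] (t, ks, false)).1 =
      if pvSufLen t ks = ks.length then t.drop (pvSufLen t ks + 1) else t.drop (pvSufLen t ks) := by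
  induction n generalizing t ks with
  | zero => omega
  | succ n ih =>
      cases ks with
      | nil =>
          cases t with
          | nil => simp [List.isPrefixOf] at hpre
          | cons c t' =>
              rw [Function.iterate_succ_apply, pvStepA_keysEmpty, pvIterate_broken]
              simp [pvSufLen]
      | cons k ks' =>
          cases t with
          | nil => simp [List.isPrefixOf] at hpre
          | cons c t' =>
              by_cases hk : k = c
              · subst hk
                rw [Function.iterate_succ_apply, pvStepA_match]
                have hpre' : ¬ (t'.isPrefixOf ks' = true) := by
                  simpa [List.isPrefixOf] using hpre
                have hn' : ks'.length < n := by simp at hn; omega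
                rw [ih t' ks' hpre' hn']
                have hs : pvSufLen (k :: t') (k :: ks') = pvSufLen t' ks' + 1 := by
                  simp [pvSufLen]
                rw [hs]
                simp only [List.length_cons]
                by_cases he : pvSufLen t' ks' = ks'.length
                · rw [if_pos he, if_pos (by omega)]
                  simp
                · rw [if_neg he, if_neg (by omega)]
                  simp
              · rw [pvIterate_mismatch (n + 1) c k t' ks' hk]
                have hs : pvSufLen (c :: t') (k :: ks') = 0 := by
                  simp [pvSufLen]
                  intro h
                  exact absurd h.symm hk
                rw [hs]
                simp

-- prefix ↔ the common-prefix count saturates the left list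
lemma pvIsPrefix_iff (t ks : List Char) :
    t.isPrefixOf ks = true ↔ (pvSufLen t ks = t.length ∧ t.length ≤ ks.length) := by
  induction t generalizing ks with
  | nil => simp [List.isPrefixOf, pvSufLen]
  | cons a as ih =>
      cases ks with
      | nil => simp [List.isPrefixOf, pvSufLen]
      | cons b bs =>
          by_cases hab : a = b
          · subst hab
            have hs : pvSufLen (a :: as) (a :: bs) = pvSufLen as bs + 1 := by simp [pvSufLen]
            simp only [List.isPrefixOf, beq_self_eq_true, Bool.true_and, List.length_cons, hs]
            rw [ih bs]
            omega
          · have h1 : (a :: as).isPrefixOf (b :: bs) = false := by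
              simp [List.isPrefixOf, hab]
            have h2 : pvSufLen (a :: as) (b :: bs) = 0 := by
              simp [pvSufLen, hab]
            simp [h1, h2]

lemma pvDrop_reverse (s : List Char) (j : ℕ) :
    (s.reverse.drop j).reverse = s.take (s.length - j) := by
  rw [List.reverse_drop]
  simp

-- ===== VERDICT (by name: the statement is the Claim_ definition above) =====
theorem delete_string_end_spec : Claim_equal_delete_string_end := by
  intro string delete_string _ hpre
  unfold Spec_delete_string_end
  simp only [delete_string_end, delete_string_end_alt]
  have hpre' : ¬ (string.toList.reverse.isPrefixOf delete_string.toList.reverse = true) := hpre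
  rw [pvLoop_eq_iterate,
    pvLoop_main (delete_string.toList.reverse.length + 1) string.toList.reverse
      delete_string.toList.reverse hpre' (by omega)]
  set s := string.toList with hsdef
  set d := delete_string.toList with hddef
  set k := pvSufLen s.reverse d.reverse with hkdef
  have hkd : k ≤ d.length := by simpa using pvSufLen_le_right s.reverse d.reverse
  have hks : k ≤ s.length := by simpa using pvSufLen_le_left s.reverse d.reverse
  have hlen : d.reverse.length = d.length := by simp
  by_cases hk : k = d.length
  · -- delete_string fully matched: extra char popped; Pre_ forces s.length > d.length
    have hgt : d.length < s.length := by
      rcases Nat.lt_or_ge d.length s.length with h | h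
      · exact h
      · exfalso
        apply hpre'
        rw [pvIsPrefix_iff]
        have hsd : s.length = d.length := by omega
        refine ⟨?_, ?_⟩
        · rw [List.length_reverse, ← hkdef]
          omega
        · simp [hsd]
    rw [if_pos (by rw [hlen]; exact hk), if_pos hk, pvDrop_reverse]
    have hb : ((s.length : Int) - (d.length : Int) - 1) = ((s.length - d.length - 1 : ℕ) : Int) := by
      omega
    rw [hb, PySem.List.slice_to_natCast]
    have hd : s.length - (k + 1) = s.length - d.length - 1 := by omega
    rw [hd]
  · rw [if_neg (by rw [hlen]; exact hk), if_neg hk, pvDrop_reverse]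
    have hb : ((s.length : Int) - (k : Int)) = ((s.length - k : ℕ) : Int) := by omega
    rw [hb, PySem.List.slice_to_natCast]

theorem delete_string_end_raises : Claim_raises_delete_string_end := by
  unfold Claim_raises_delete_string_end
  exact ⟨fun _ _ _ h hp => hp h, by decide⟩

-- witness self-check: B's port really returns the stated value where A raises
theorem pvRaiseWitness_delete_string_end_ok :
    delete_string_end_alt pvRaiseWitness_delete_string_end.1 pvRaiseWitness_delete_string_end.2
      = pvRaiseWitnessOut_delete_string_end :=
  delete_string_end_raises.2.2.2
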